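-- pv_equiv track=rewrite | github.com/humaningansalam/CoTe_python | 프로그래머스/1/138477. 명예의 전당 （1）/명예의 전당 （1）.py | solution
-- ===== SOURCE A (Python) =====
-- def solution(k, score):
--     answer = []
--     hall = []
--     for x in score:
--         hall.append(x)
--         hall.sort(reverse=True)  # 리스트 정렬
--
--         if len(hall) >= k:
--             hall[:] = hall[:k]
--
--         answer.append(hall[-1])
--
--     return answer
-- ===== SOURCE B (Python) =====
-- def solution(k, score):
--     answer = []
--     top = []  # ascending; holds the (at most) k best scores seen so far
--     for x in score:
--         # binary search: first position whose element exceeds x (insert after equals)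
--         lo, hi = 0, len(top)
--         while lo < hi:
--             mid = (lo + hi) // 2
--             if top[mid] <= x:
--                 lo = mid + 1
--             else:
--                 hi = mid
--         top.insert(lo, x)
--         if len(top) > k:
--             del top[0]
--         answer.append(top[0])
--     return answer
-- ===== Notes on version B (the rewrite author's own statement) =====
-- stated objective: faster
-- what changed: B replaces A's full re-sort of the hall on every score (sort desc + truncate to k, report last) by incremental maintenance of an ascending top-k list: binary search for the insertion point, insert, drop the minimum when the list exceeds k, report the head.
import Mathlib
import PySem

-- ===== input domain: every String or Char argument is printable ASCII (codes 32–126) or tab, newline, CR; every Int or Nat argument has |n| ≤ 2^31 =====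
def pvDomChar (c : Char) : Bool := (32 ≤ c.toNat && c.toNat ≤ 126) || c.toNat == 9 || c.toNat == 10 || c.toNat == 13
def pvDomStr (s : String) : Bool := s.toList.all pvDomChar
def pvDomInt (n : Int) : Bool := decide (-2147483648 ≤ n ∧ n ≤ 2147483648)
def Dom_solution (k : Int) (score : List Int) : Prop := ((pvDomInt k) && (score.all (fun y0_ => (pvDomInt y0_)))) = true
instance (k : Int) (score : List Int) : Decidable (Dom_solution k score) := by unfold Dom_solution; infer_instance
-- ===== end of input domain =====

-- B maintains the current top-k incrementally (binary-search insertion into an ascending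
-- list, drop the minimum when over k) instead of A's full re-sort + truncation each step.

-- ===== PORT A =====
-- hall[-1] via pyGet?; it is some _ on every input admitted by Pre_solution (getD 0 is never taken there).
def solution (k : Int) (score : List Int) : List Int :=
  (score.foldl (fun (s : List Int × List Int) x =>
      let hall1 := PySem.List.sorted (s.2 ++ [x]) (fun y => y) true
      let hall2 := if k ≤ (hall1.length : Int) then PySem.List.slice hall1 none (some k) else hall1
      (s.1 ++ [(PySem.List.pyGet? hall2 (-1)).getD 0], hall2))
    ([], ([] : List Int))).1

-- ===== PORT B =====
-- Source B's 'while lo < hi' binary search; top[mid] as getD (0 ≤ mid < hi ≤ len(top)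
-- throughout the search, so the total indexing is exact there).
-- Source B's 'while lo < hi' binary search; structural recursion on the fuel hi - lo (the
-- interval shrinks each turn, so the fuel is never exhausted while lo < hi); top[mid] as
-- getD (0 ≤ mid < hi ≤ len(top) throughout the search, so the total indexing is exact there).
def bisRAux (top : List Int) (x : Int) : Nat → Nat → Nat → Nat
  | 0, lo, _ => lo
  | d + 1, lo, hi =>
    if lo < hi then
      let mid := (lo + hi) / 2
      if top.getD mid 0 ≤ x then bisRAux top x d (mid + 1) hi
      else bisRAux top x d lo mid
    else lo

def bisR (top : List Int) (x : Int) (lo hi : Nat) : Nat := bisRAux top x (hi - lo) lo hi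

-- top[0] via headD; the list is nonempty on every input admitted by Pre_solution.
def solution_alt (k : Int) (score : List Int) : List Int :=
  (score.foldl (fun (s : List Int × List Int) x =>
      let lo := bisR s.2 x 0 s.2.length
      let top1 := PySem.List.insert s.2 (lo : Int) x
      let top2 := if k < (top1.length : Int) then top1.tail else top1
      (s.1 ++ [top2.headD 0], top2))
    ([], ([] : List Int))).1

-- ===== PRECONDITION & SPEC =====
-- Pre_ excludes k ≤ 0 with a nonempty score: there Python A (and B) truncate the hall to
-- empty and raise IndexError on hall[-1] (resp. top[0]).
def Pre_solution (k : Int) (score : List Int) : Prop := 1 ≤ k ∨ score = []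
instance (k : Int) (score : List Int) : Decidable (Pre_solution k score) := by unfold Pre_solution; infer_instance
def pvWitness_solution : Int × List Int := (3, [10, 100, 20, 150, 1, 100, 200])

def Spec_solution (k : Int) (score : List Int) (out : List Int) : Prop := out = solution_alt k score
instance (k : Int) (score : List Int) (out : List Int) : Decidable (Spec_solution k score out) := by unfold Spec_solution; infer_instance

-- ===== CLAIM (what is proved, stated in full; the proofs are below) =====
def Claim_equal_solution : Prop := ∀ (k : Int) (score : List Int), Dom_solution k score → Pre_solution k score → Spec_solution k score (solution k score)

-- ===== LEMMAS AND PROOFS =====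

-- Proof-side description of one B insertion: x goes after every element ≤ x.
def insAsc (x : Int) : List Int → List Int
  | [] => [x]
  | y :: ys => if y ≤ x then y :: insAsc x ys else x :: y :: ys

theorem insAsc_perm (x : Int) (l : List Int) : (insAsc x l).Perm (x :: l) := by
  induction l with
  | nil => simp [insAsc]
  | cons y ys ih =>
    simp only [insAsc]
    split
    · exact (ih.cons y).trans (List.Perm.swap x y ys)
    · rfl

theorem insAsc_length (x : Int) (l : List Int) : (insAsc x l).length = l.length + 1 :=
  (insAsc_perm x l).length_eq

theorem insAsc_pairwise (x : Int) (l : List Int) (h : l.Pairwise (· ≤ ·)) :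
    (insAsc x l).Pairwise (· ≤ ·) := by
  induction l with
  | nil => simp [insAsc]
  | cons y ys ih =>
    rw [List.pairwise_cons] at h
    simp only [insAsc]
    split
    · rename_i hyx
      refine List.pairwise_cons.2 ⟨?_, ih h.2⟩
      intro a ha
      rcases List.mem_cons.1 ((insAsc_perm x ys).mem_iff.1 ha) with h' | h'
      · exact h' ▸ hyx
      · exact h.1 a h'
    · rename_i hyx
      refine List.pairwise_cons.2 ⟨?_, List.pairwise_cons.2 h⟩
      intro a ha
      rcases List.mem_cons.1 ha with h' | h'
      · subst h'; omega
      · exact le_trans (by omega) (h.1 a h')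

theorem last_getD_reverse (l : List Int) :
    (PySem.List.pyGet? l.reverse (-1)).getD 0 = l.headD 0 := by
  cases l with
  | nil => rfl
  | cons h t =>
    have h1 : PySem.List.pyGet? (h::t).reverse (-1) = (h::t).reverse.getLast? := by
      simp [PySem.List.pyGet?, PySem.List.pyIdx?, List.getLast?_eq_getElem?]

    rw [h1, List.getLast?_reverse]
    simp

theorem tw_getElem (p : Int → Bool) (l : List Int) (i : Nat) (h2 : i < l.length)
    (h : i < (l.takeWhile p).length) : p l[i] := by
  induction l generalizing i with
  | nil => simp at h2
  | cons a t ih =>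
    by_cases hp : p a
    · cases i with
      | zero => simpa using hp
      | succ j =>
        simp only [List.takeWhile_cons, hp, if_true, List.length_cons] at h
        simpa using ih j (by simpa using h2) (by omega)
    · simp [hp] at h

theorem tw_not (p : Int → Bool) (l : List Int) (h : (l.takeWhile p).length < l.length) :
    ¬ p (l[(l.takeWhile p).length]'h) := by
  induction l with
  | nil => simp at h
  | cons a t ih =>
    by_cases hp : p a
    · simp only [List.takeWhile_cons, hp, if_true, List.length_cons] at h ⊢
      simpa using ih (by omega)
    · simp [hp]

theorem insert_natCast (top : List Int) (n : Nat) (x : Int) (hn : n ≤ top.length) :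
    PySem.List.insert top (n : Int) x = top.take n ++ x :: top.drop n := by
  simp only [PySem.List.insert, PySem.List.sliceIndices]
  norm_num
  split_ifs with h1
  · exact absurd h1 (by omega)
  · rw [min_eq_left (by exact_mod_cast hn)]
    simp

theorem insAsc_eq_insertAt (x : Int) (top : List Int) :
    top.take (top.takeWhile (fun y => decide (y ≤ x))).length ++
      x :: top.drop (top.takeWhile (fun y => decide (y ≤ x))).length = insAsc x top := by
  induction top with
  | nil => rfl
  | cons y ys ih =>
    by_cases hy : y ≤ x
    · simp only [List.takeWhile_cons, hy, decide_true, if_true, List.length_cons,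
        List.take_succ_cons, List.drop_succ_cons, List.cons_append, insAsc]
      rw [ih]
    · simp [insAsc, hy]

theorem bisR_correct (x : Int) (top : List Int) (hasc : top.Pairwise (· ≤ ·)) :
    ∀ (d lo hi : Nat), hi - lo ≤ d →
      lo ≤ (top.takeWhile (fun y => decide (y ≤ x))).length →
      (top.takeWhile (fun y => decide (y ≤ x))).length ≤ hi → hi ≤ top.length →
      bisRAux top x d lo hi = (top.takeWhile (fun y => decide (y ≤ x))).length := by
  intro d
  induction d with
  | zero =>
    intro lo hi hd h1 h2 h3
    simp only [bisRAux]
    omega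
  | succ d ih =>
    intro lo hi hd h1 h2 h3
    set T := (top.takeWhile (fun y => decide (y ≤ x))).length with hT
    simp only [bisRAux]
    by_cases hlh : lo < hi
    · rw [if_pos hlh]
      have hmlt : (lo + hi) / 2 < hi := Nat.div_lt_of_lt_mul (by omega)
      have hmge : lo ≤ (lo + hi) / 2 := (Nat.le_div_iff_mul_le (by omega)).2 (by omega)
      have hmlen : (lo + hi) / 2 < top.length := by omega
      rw [List.getD_eq_getElem top 0 hmlen]
      by_cases hcmp : top[(lo + hi) / 2] ≤ x
      · rw [if_pos hcmp]
        -- element ≤ x lies strictly before the first failing position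
        have hmT : (lo + hi) / 2 < T := by
          by_contra hge
          have hTlen : T < top.length := by omega
          have hTgt : ¬ (top[T]'hTlen ≤ x) := by
            have := tw_not (fun y => decide (y ≤ x)) top hTlen
            simpa using this
          rcases Nat.lt_or_ge T ((lo + hi) / 2) with hlt | hge2
          · have hmono := List.pairwise_iff_getElem.1 hasc T ((lo + hi) / 2) hTlen hmlen hlt
            omega
          · have heq2 : top[T]'hTlen = top[(lo + hi) / 2]'hmlen := by congr 1; omega
            rw [heq2] at hTgt
            exact hTgt hcmp
        exact ih ((lo + hi) / 2 + 1) hi (by omega) (by omega) h2 h3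
      · rw [if_neg hcmp]
        -- element > x lies at or after the first failing position
        have hmT : T ≤ (lo + hi) / 2 := by
          by_contra hlt
          have := tw_getElem (fun y => decide (y ≤ x)) top ((lo + hi) / 2) hmlen (by omega)
          simp at this
          omega
        exact ih lo ((lo + hi) / 2) (by omega) h1 hmT (by omega)
    · rw [if_neg hlh]
      omega

-- One B insertion (binary search + insert) is exactly the ordered insertion insAsc.
theorem bisR_insert (x : Int) (top : List Int) (hasc : top.Pairwise (· ≤ ·)) :
    PySem.List.insert top ((bisR top x 0 top.length : Nat) : Int) x = insAsc x top := by
  have hTle : (top.takeWhile (fun y => decide (y ≤ x))).length ≤ top.length :=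
    (List.takeWhile_sublist _).length_le
  rw [bisR, bisR_correct x top hasc (top.length - 0) 0 top.length (by omega) (by omega) hTle le_rfl]
  rw [insert_natCast top _ x hTle]
  exact insAsc_eq_insertAt x top

-- One step of A's loop equals (the reverse of) one step of B's loop, preserving the
-- invariant: A's hall is descending, of length ≤ k, and is the reverse of B's top.
theorem step_eq (k : Int) (hk : 1 ≤ k) (hall : List Int)
    (hp : hall.Pairwise (fun a b => b ≤ a)) (hlen : hall.length ≤ k.toNat) (x : Int) :
    (if k ≤ ((PySem.List.sorted (hall ++ [x]) (fun y => y) true).length : Int) then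
        PySem.List.slice (PySem.List.sorted (hall ++ [x]) (fun y => y) true) none (some k)
      else PySem.List.sorted (hall ++ [x]) (fun y => y) true) =
      (if k < ((insAsc x hall.reverse).length : Int) then (insAsc x hall.reverse).tail
        else insAsc x hall.reverse).reverse ∧
    (if k ≤ ((PySem.List.sorted (hall ++ [x]) (fun y => y) true).length : Int) then
        PySem.List.slice (PySem.List.sorted (hall ++ [x]) (fun y => y) true) none (some k)
      else PySem.List.sorted (hall ++ [x]) (fun y => y) true).Pairwise (fun a b => b ≤ a) ∧
    (if k ≤ ((PySem.List.sorted (hall ++ [x]) (fun y => y) true).length : Int) then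
        PySem.List.slice (PySem.List.sorted (hall ++ [x]) (fun y => y) true) none (some k)
      else PySem.List.sorted (hall ++ [x]) (fun y => y) true).length ≤ k.toNat := by
  set hall1 := PySem.List.sorted (hall ++ [x]) (fun y => y) true with hh1
  set t1 := insAsc x hall.reverse with ht1
  have p1 : hall1.Perm (hall ++ [x]) := PySem.List.sorted_perm _ _ _
  have p2 : t1.Perm (x :: hall.reverse) := insAsc_perm x hall.reverse
  have hperm : hall1.reverse.Perm t1 :=
    (hall1.reverse_perm.trans p1).trans ((List.perm_append_singleton x hall).trans
      (((hall.reverse_perm.symm).cons x).trans p2.symm))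
  have hpw1 : hall1.reverse.Pairwise (· ≤ ·) := by
    rw [List.pairwise_reverse]
    exact PySem.List.sorted_pairwise_rev (hall ++ [x]) (fun y => y)
  have hpw2 : t1.Pairwise (· ≤ ·) :=
    insAsc_pairwise x hall.reverse (by rw [List.pairwise_reverse]; exact hp)
  have heq : hall1.reverse = t1 :=
    PySem.List.eq_of_perm_of_pairwise_le_of_injective (fun y => y)
      (fun _ _ h => h) hperm hpw1 hpw2
  have h1 : hall1 = t1.reverse := by rw [← heq, List.reverse_reverse]
  have hlen1 : hall1.length = hall.length + 1 := by
    have h := (PySem.List.sorted_perm (hall ++ [x]) (fun y => y) true).length_eq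
    simp only [List.length_append, List.length_singleton] at h
    exact h
  have hlt1 : t1.length = hall.length + 1 := by
    rw [ht1, insAsc_length, List.length_reverse]
  have hpwd : hall1.Pairwise (fun a b => b ≤ a) :=
    PySem.List.sorted_pairwise_rev (hall ++ [x]) (fun y => y)
  by_cases hc : k ≤ (hall1.length : Int)
  · have hsl : PySem.List.slice hall1 none (some k) = hall1.take k.toNat :=
      PySem.List.slice_to hall1 (by omega)
    rw [if_pos hc, hsl]
    have hkn : k.toNat = hall.length ∨ k.toNat = hall.length + 1 := by omega
    rcases hkn with hkn | hkn
    · -- over capacity: A drops the last element, B drops the head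
      have hcb : k < (t1.length : Int) := by omega
      rw [if_pos hcb]
      have htk : hall1.take k.toNat = hall1.dropLast := by
        rw [List.dropLast_eq_take]; congr 1; omega
      refine ⟨?_, ?_, ?_⟩
      · rw [htk, h1, List.dropLast_reverse]
      · exact hpwd.sublist (List.take_sublist _ _)
      · simp [hkn, hlen1]
    · -- exactly full: both keep everything
      have hcb : ¬ k < (t1.length : Int) := by omega
      rw [if_neg hcb]
      have hta : hall1.take k.toNat = hall1 := List.take_of_length_le (by omega)
      rw [hta]
      exact ⟨h1, hpwd, by omega⟩
  · have hcb : ¬ k < (t1.length : Int) := by omega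
    rw [if_neg hc, if_neg hcb]
    exact ⟨h1, hpwd, by omega⟩

theorem loop_eq (k : Int) (hk : 1 ≤ k) (score : List Int) :
    ∀ (ans hall : List Int), hall.Pairwise (fun a b => b ≤ a) → hall.length ≤ k.toNat →
    (score.foldl (fun (s : List Int × List Int) x =>
      let hall1 := PySem.List.sorted (s.2 ++ [x]) (fun y => y) true
      let hall2 := if k ≤ (hall1.length : Int) then PySem.List.slice hall1 none (some k) else hall1
      (s.1 ++ [(PySem.List.pyGet? hall2 (-1)).getD 0], hall2)) (ans, hall)).1 =
    (score.foldl (fun (s : List Int × List Int) x =>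
      let lo := bisR s.2 x 0 s.2.length
      let top1 := PySem.List.insert s.2 (lo : Int) x
      let top2 := if k < (top1.length : Int) then top1.tail else top1
      (s.1 ++ [top2.headD 0], top2)) (ans, hall.reverse)).1 := by
  induction score with
  | nil => intro ans hall _ _; rfl
  | cons x xs ih =>
    intro ans hall hp hlen
    have hasc : hall.reverse.Pairwise (· ≤ ·) := by
      rw [List.pairwise_reverse]; exact hp
    have hb := bisR_insert x hall.reverse hasc
    obtain ⟨heq, hp2, hlen2⟩ := step_eq k hk hall hp hlen x
    simp only [List.foldl_cons]
    rw [hb, heq, last_getD_reverse] at *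
    have hres := ih (ans ++ [(if k < ((insAsc x hall.reverse).length : Int) then
        (insAsc x hall.reverse).tail else insAsc x hall.reverse).headD 0])
      ((if k < ((insAsc x hall.reverse).length : Int) then
        (insAsc x hall.reverse).tail else insAsc x hall.reverse).reverse)
      hp2 hlen2
    rw [List.reverse_reverse] at hres
    exact hres

-- ===== VERDICT (by name: the statement is the Claim_ definition above) =====
theorem solution_spec : Claim_equal_solution := by
  intro k score _ hpre
  unfold Spec_solution solution solution_alt
  rcases hpre with hk | rfl
  · exact loop_eq k hk score [] [] (by simp) (by simp)
  · rfl
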